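-- pv_equiv track=rewrite | github.com/PRIS2-21-22/ji | controller/polinomio.py | product_polynom
-- ===== SOURCE A (Python) =====
-- def product_polynom(arr):
--     result = ""
--     aux = []
--
--     for inx, val in enumerate(arr):
--         for j in arr:
--             aux.append(arr[inx][0] * j[1])
--
--     for idx, val in reversed(list(enumerate(reversed(aux)))):
--         result += str(val) + "x^" + str(idx) + " "
--
--     return result
-- ===== SOURCE B (Python) =====
-- def product_polynom(arr):
--     # Single pass with a running exponent counter; no intermediate aux list,
--     # no reversed/enumerate/reversed dance.
--     n = len(arr)
--     exp = n * n - 1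
--     parts = []
--     for i in arr:
--         for j in arr:
--             parts.append(str(i[0] * j[1]) + "x^" + str(exp) + " ")
--             exp -= 1
--     return "".join(parts)
-- ===== Notes on version B (the rewrite author's own statement) =====
-- stated objective: simpler
-- what changed: B drops A's intermediate aux list and the reversed(list(enumerate(reversed(aux)))) re-indexing pass: it keeps one running exponent counter starting at n*n-1 and emits each term directly in the single nested loop, joining the pieces at the end.
import Mathlib
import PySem

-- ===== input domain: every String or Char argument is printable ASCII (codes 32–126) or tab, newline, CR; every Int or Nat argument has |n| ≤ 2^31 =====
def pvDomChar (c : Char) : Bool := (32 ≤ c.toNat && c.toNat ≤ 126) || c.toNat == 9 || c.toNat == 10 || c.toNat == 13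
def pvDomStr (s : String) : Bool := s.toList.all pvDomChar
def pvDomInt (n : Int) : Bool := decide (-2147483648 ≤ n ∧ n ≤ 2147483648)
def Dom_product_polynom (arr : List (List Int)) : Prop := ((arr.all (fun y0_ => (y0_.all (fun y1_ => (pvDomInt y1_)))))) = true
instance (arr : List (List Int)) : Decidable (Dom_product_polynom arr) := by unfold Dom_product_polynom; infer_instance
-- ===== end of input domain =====

-- B replaces A's build-aux-list-then-reversed(enumerate(reversed(...))) reformatting pass by one
-- nested loop with a running exponent counter (objective: simpler, one pass instead of two).

-- ===== PORT A =====
-- Row accesses arr[inx][0] / j[1] are ported with pyGetD; Python raises IndexError on rows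
-- shorter than 2, and Pre_ excludes exactly those inputs.
def product_polynom (arr : List (List Int)) : String :=
  let aux : List Int :=
    (PySem.List.enumerate arr).foldl (fun aux p =>
      arr.foldl (fun aux j =>
        aux ++ [PySem.List.pyGetD (PySem.List.pyGetD arr p.1 []) 0 0 * PySem.List.pyGetD j 1 0]) aux) []
  ((PySem.List.enumerate aux.reverse).reverse).foldl
    (fun result p => result ++ (PySem.Int.toStr p.2 ++ "x^" ++ PySem.Int.toStr p.1 ++ " ")) ""

-- ===== PORT B =====
def product_polynom_alt (arr : List (List Int)) : String :=
  let n : Int := (arr.length : Int)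
  let st :=
    arr.foldl (fun st i =>
      arr.foldl (fun st j =>
        (st.1 - 1,
         st.2 ++ [PySem.Int.toStr (PySem.List.pyGetD i 0 0 * PySem.List.pyGetD j 1 0) ++
                  "x^" ++ PySem.Int.toStr st.1 ++ " "])) st)
      (n * n - 1, ([] : List String))
  PySem.Str.join "" st.2

-- ===== PRECONDITION & SPEC =====
-- Pre_ excludes exactly the inputs on which the Python A raises IndexError
-- (a nonempty arr containing a row with fewer than 2 entries); B raises there too.
def Pre_product_polynom (arr : List (List Int)) : Prop := ∀ row ∈ arr, 2 ≤ row.length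
instance (arr : List (List Int)) : Decidable (Pre_product_polynom arr) := by
  unfold Pre_product_polynom; infer_instance

def pvWitness_product_polynom : List (List Int) := [[1, 2], [3, 4]]

def Spec_product_polynom (arr : List (List Int)) (out : String) : Prop := out = product_polynom_alt arr
instance (arr : List (List Int)) (out : String) : Decidable (Spec_product_polynom arr out) := by
  unfold Spec_product_polynom; infer_instance

-- ===== CLAIM (what is proved, stated in full; the proofs are below) =====
def Claim_equal_product_polynom : Prop := ∀ (arr : List (List Int)), Dom_product_polynom arr → Pre_product_polynom arr → Spec_product_polynom arr (product_polynom arr)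

-- ===== LEMMAS AND PROOFS =====

-- one printed term "<v>x^<e> "
def ppChunk (v e : Int) : String :=
  PySem.Int.toStr v ++ "x^" ++ PySem.Int.toStr e ++ " "

-- the sequence of terms for values ys starting at exponent e, descending
def ppChunks : List Int → Int → List String
  | [], _ => []
  | v :: t, e => ppChunk v e :: ppChunks t (e - 1)

-- the pairwise products, in the order both loops produce them
def ppVals (arr : List (List Int)) : List Int :=
  arr.flatMap (fun i => arr.map (fun j => PySem.List.pyGetD i 0 0 * PySem.List.pyGetD j 1 0))

lemma ppVals_length (arr : List (List Int)) : (ppVals arr).length = arr.length * arr.length := by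
  simp [ppVals]

lemma sjoin_nil : PySem.Str.join "" ([] : List String) = "" := by
  apply String.toList_inj.mp
  simp [PySem.Str.toList_join, PySem.Chars.join_nil]

lemma sjoin_cons (c : String) (rest : List String) :
    PySem.Str.join "" (c :: rest) = c ++ PySem.Str.join "" rest := by
  apply String.toList_inj.mp
  cases rest <;>
    simp [PySem.Str.toList_join, PySem.Chars.join_nil, PySem.Chars.join_singleton,
      PySem.Chars.join_cons_cons, String.toList_append]

-- A's first double loop builds exactly the pairwise-product list ppVals
lemma aux_eq (arr : List (List Int)) :
    (PySem.List.enumerate arr).foldl (fun aux p =>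
      arr.foldl (fun aux j =>
        aux ++ [PySem.List.pyGetD (PySem.List.pyGetD arr p.1 []) 0 0 * PySem.List.pyGetD j 1 0]) aux) []
    = ppVals arr := by
  have hmem : ∀ p ∈ PySem.List.enumerate arr, PySem.List.pyGetD arr p.1 [] = p.2 := by
    intro p hp
    rcases (PySem.List.mem_enumerate_iff arr 0 p).mp hp with ⟨k, hk, rfl⟩
    simp [PySem.List.pyGetD_natCast, List.getD, List.getElem?_eq_getElem hk]
  calc (PySem.List.enumerate arr).foldl (fun aux p =>
        arr.foldl (fun aux j =>
          aux ++ [PySem.List.pyGetD (PySem.List.pyGetD arr p.1 []) 0 0 * PySem.List.pyGetD j 1 0]) aux) []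
      = (PySem.List.enumerate arr).foldl (fun aux p =>
          aux ++ arr.map (fun j => PySem.List.pyGetD (PySem.List.pyGetD arr p.1 []) 0 0 * PySem.List.pyGetD j 1 0)) [] := by
        apply PySem.List.foldl_congr_mem
        intro acc p _
        exact PySem.List.foldl_append_singleton_eq_map ..
    _ = (PySem.List.enumerate arr).flatMap (fun p =>
          arr.map (fun j => PySem.List.pyGetD (PySem.List.pyGetD arr p.1 []) 0 0 * PySem.List.pyGetD j 1 0)) := by
        rw [PySem.List.foldl_append_eq_flatMap]; rfl
    _ = (PySem.List.enumerate arr).flatMap (fun p =>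
          arr.map (fun j => PySem.List.pyGetD p.2 0 0 * PySem.List.pyGetD j 1 0)) := by
        apply List.flatMap_congr
        intro p hp
        rw [hmem p hp]
    _ = ppVals arr := by
        rw [ppVals]
        have h := List.flatMap_map
          (l := PySem.List.enumerate arr) (f := fun p : Int × List Int => p.2)
          (g := fun i => arr.map (fun j => PySem.List.pyGetD i 0 0 * PySem.List.pyGetD j 1 0))
        rw [PySem.List.map_snd_enumerate] at h
        rw [← h]

-- A's reversed(enumerate(reversed(aux))) loop pairs aux in order with exponents len-1, len-2, …, 0
lemma a_loop (ys : List Int) (s : String) :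
    ((PySem.List.enumerate ys.reverse).reverse).foldl
      (fun result p => result ++ (PySem.Int.toStr p.2 ++ "x^" ++ PySem.Int.toStr p.1 ++ " ")) s
    = s ++ PySem.Str.join "" (ppChunks ys ((ys.length : Int) - 1)) := by
  induction ys generalizing s with
  | nil =>
      simp only [List.reverse_nil, PySem.List.enumerate_nil, List.foldl_nil, ppChunks, sjoin_nil]
      exact String.append_empty.symm
  | cons y t ih =>
      rw [List.reverse_cons, PySem.List.enumerate_append]
      simp only [PySem.List.enumerate_cons, PySem.List.enumerate_nil, List.length_reverse,
        List.reverse_append, List.reverse_cons, List.reverse_nil, List.nil_append,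
        List.cons_append, List.foldl_cons]
      rw [ih]
      simp only [List.length_cons, ppChunks, sjoin_cons]
      push_cast
      simp only [zero_add, ppChunk, String.append_assoc, add_sub_cancel_right]

-- B's counter loop over a value list: final state is (e - len, parts ++ chunks)
lemma b_state (ys : List Int) (e : Int) (parts : List String) :
    ys.foldl (fun st v => (st.1 - 1, st.2 ++ [ppChunk v st.1])) (e, parts)
    = (e - ys.length, parts ++ ppChunks ys e) := by
  induction ys generalizing e parts with
  | nil => simp [ppChunks]
  | cons v t ih => simp only [List.foldl_cons, ih, ppChunks, List.length_cons]
                   refine Prod.ext ?_ (by simp)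
                   push_cast; ring

lemma b_eq (arr : List (List Int)) :
    product_polynom_alt arr
    = PySem.Str.join "" (ppChunks (ppVals arr) (((arr.length : Int)) * (arr.length : Int) - 1)) := by
  unfold product_polynom_alt
  have hinner : ∀ (i : List Int) (st : Int × List String),
      arr.foldl (fun st j =>
        (st.1 - 1,
         st.2 ++ [PySem.Int.toStr (PySem.List.pyGetD i 0 0 * PySem.List.pyGetD j 1 0) ++
                  "x^" ++ PySem.Int.toStr st.1 ++ " "])) st
      = (arr.map (fun j => PySem.List.pyGetD i 0 0 * PySem.List.pyGetD j 1 0)).foldl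
          (fun st v => (st.1 - 1, st.2 ++ [ppChunk v st.1])) st := by
    intro i st
    rw [List.foldl_map]
    rfl
  simp only [hinner]
  rw [← List.foldl_flatMap, ← ppVals, b_state]
  simp

-- ===== VERDICT (by name: the statement is the Claim_ definition above) =====
theorem product_polynom_spec : Claim_equal_product_polynom := by
  intro arr _ _
  unfold Spec_product_polynom
  show product_polynom arr = _
  unfold product_polynom
  rw [aux_eq, a_loop, b_eq, ppVals_length]
  simp
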